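-- pv_equiv track=rewrite | github.com/uclcrypto/spook-python | spook.py | dbox
-- ===== SOURCE A (Python) =====
-- SMALL_PERM=False
--
-- def dbox(x):
--     if SMALL_PERM:
--         y = [[0, 0, 0, 0] for _ in range(3)]
--         for i in range(4):
--             y[0][i] = x[0][i]^x[1][i]^x[2][i]
--             y[1][i] = x[0][i]^x[2][i]
--             y[2][i] = x[0][i]^x[1][i]
--     else:
--         y = [[0, 0, 0, 0] for _ in range(4)]
--         for i in range(4):
--             y[0][i] = x[1][i]^x[2][i]^x[3][i]
--             y[1][i] = x[0][i]^x[2][i]^x[3][i]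
--             y[2][i] = x[0][i]^x[1][i]^x[3][i]
--             y[3][i] = x[0][i]^x[1][i]^x[2][i]
--     return y
-- ===== SOURCE B (Python) =====
-- SMALL_PERM = False
--
-- def dbox(x):
--     if SMALL_PERM:
--         y = []
--         t = [x[0][i] ^ x[1][i] ^ x[2][i] for i in range(4)]
--         y.append(t[:])
--         y.append([t[i] ^ x[1][i] for i in range(4)])
--         y.append([t[i] ^ x[2][i] for i in range(4)])
--         return y
--     t = [x[0][i] ^ x[1][i] ^ x[2][i] ^ x[3][i] for i in range(4)]
--     return [[t[i] ^ x[j][i] for i in range(4)] for j in range(4)]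
-- ===== Notes on version B (the rewrite author's own statement) =====
-- stated objective: alternative
-- what changed: B first computes the full column parity t (XOR of all four rows) per column, then derives each output cell as t XOR the corresponding input cell, instead of recomputing each 3-term XOR independently.
import Mathlib
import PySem

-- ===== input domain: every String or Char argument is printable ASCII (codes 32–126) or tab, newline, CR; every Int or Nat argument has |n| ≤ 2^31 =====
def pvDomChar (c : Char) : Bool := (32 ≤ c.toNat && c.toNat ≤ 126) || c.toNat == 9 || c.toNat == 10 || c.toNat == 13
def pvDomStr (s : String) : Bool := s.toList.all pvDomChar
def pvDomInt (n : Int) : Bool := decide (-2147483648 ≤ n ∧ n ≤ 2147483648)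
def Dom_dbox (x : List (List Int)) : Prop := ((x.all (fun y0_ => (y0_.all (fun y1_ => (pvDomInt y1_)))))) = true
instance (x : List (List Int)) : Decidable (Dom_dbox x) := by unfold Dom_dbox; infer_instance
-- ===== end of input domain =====

-- B replaces A's four independent 3-term column XORs by one total column parity t
-- followed by per-row cancellation y[j][i] = t ^ x[j][i]; same value, alternative decomposition (no speed claim).

-- ===== PORT A =====
-- x[j][i] with both indexes in range on Pre_ (pyGetD's default is never reached inside Pre_)
def pvCell (x : List (List Int)) (j i : Int) : Int :=
  PySem.List.pyGetD (PySem.List.pyGetD x j []) i 0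

-- SMALL_PERM = False in the module, so only the else-branch is live code; the loop over
-- i in range(4) filling the four rows is written as one map per row.
def dbox (x : List (List Int)) : List (List Int) :=
  [ (List.range 4).map (fun i => PySem.Int.bxor (PySem.Int.bxor (pvCell x 1 (i : Int)) (pvCell x 2 (i : Int))) (pvCell x 3 (i : Int))),
    (List.range 4).map (fun i => PySem.Int.bxor (PySem.Int.bxor (pvCell x 0 (i : Int)) (pvCell x 2 (i : Int))) (pvCell x 3 (i : Int))),
    (List.range 4).map (fun i => PySem.Int.bxor (PySem.Int.bxor (pvCell x 0 (i : Int)) (pvCell x 1 (i : Int))) (pvCell x 3 (i : Int))),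
    (List.range 4).map (fun i => PySem.Int.bxor (PySem.Int.bxor (pvCell x 0 (i : Int)) (pvCell x 1 (i : Int))) (pvCell x 2 (i : Int))) ]

-- ===== PORT B =====
def dbox_alt (x : List (List Int)) : List (List Int) :=
  let t := (List.range 4).map (fun i =>
    PySem.Int.bxor (PySem.Int.bxor (PySem.Int.bxor (pvCell x 0 (i : Int)) (pvCell x 1 (i : Int))) (pvCell x 2 (i : Int))) (pvCell x 3 (i : Int)))
  (List.range 4).map (fun j => (List.range 4).map (fun i =>
    PySem.Int.bxor (PySem.List.pyGetD t (i : Int) 0) (pvCell x (j : Int) (i : Int))))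

-- ===== PRECONDITION & SPEC =====
-- Pre_ excludes exactly the inputs on which Python A raises IndexError: fewer than 4 rows,
-- or one of the first 4 rows shorter than 4.
def Pre_dbox (x : List (List Int)) : Prop :=
  4 ≤ x.length ∧ ∀ r ∈ x.take 4, 4 ≤ r.length
instance (x : List (List Int)) : Decidable (Pre_dbox x) := by unfold Pre_dbox; infer_instance

def pvWitness_dbox : List (List Int) :=
  [[1, 2, 3, 4], [5, 6, 7, 8], [9, 10, 11, 12], [13, 14, 15, 16]]

def Spec_dbox (x : List (List Int)) (out : List (List Int)) : Prop := out = dbox_alt x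
instance (x : List (List Int)) (out : List (List Int)) : Decidable (Spec_dbox x out) := by unfold Spec_dbox; infer_instance

-- ===== CLAIM (what is proved, stated in full; the proofs are below) =====
def Claim_equal_dbox : Prop := ∀ (x : List (List Int)), Dom_dbox x → Pre_dbox x → Spec_dbox x (dbox x)

-- ===== LEMMAS AND PROOFS =====

-- bxor agrees with Mathlib's Int.xor (not in the PySem lemma book; proved once here)
theorem pv_bxor_eq_xor (a b : Int) : PySem.Int.bxor a b = Int.xor a b := by
  cases a with
  | ofNat m => cases b with
    | ofNat n => simp [PySem.Int.bxor, Int.xor]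
    | negSucc n => simp [PySem.Int.bxor, Int.xor, Int.negSucc_eq]; omega
  | negSucc m => cases b with
    | ofNat n => simp [PySem.Int.bxor, Int.xor, Int.negSucc_eq]; omega
    | negSucc n => simp [PySem.Int.bxor, Int.xor, Int.negSucc_eq]; omega

theorem pv_bxor_assoc (a b c : Int) :
    PySem.Int.bxor (PySem.Int.bxor a b) c = PySem.Int.bxor a (PySem.Int.bxor b c) := by
  simp only [pv_bxor_eq_xor]
  cases a <;> cases b <;> cases c <;> simp [Int.xor, Nat.xor_assoc]

theorem pv_bxor_left_comm (a b c : Int) :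
    PySem.Int.bxor a (PySem.Int.bxor b c) = PySem.Int.bxor b (PySem.Int.bxor a c) := by
  rw [← pv_bxor_assoc, PySem.Int.bxor_comm a b, pv_bxor_assoc]

theorem pv_zero_bxor (b : Int) : PySem.Int.bxor 0 b = b := by
  rw [PySem.Int.bxor_comm, PySem.Int.bxor_zero]

theorem pv_bxor_cancel (a b : Int) : PySem.Int.bxor a (PySem.Int.bxor a b) = b := by
  rw [← pv_bxor_assoc, PySem.Int.bxor_self]
  rw [PySem.Int.bxor_comm, PySem.Int.bxor_zero]

-- ===== VERDICT (by name: the statement is the Claim_ definition above) =====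
theorem dbox_spec : Claim_equal_dbox := by
  intro x _ _
  show dbox x = dbox_alt x
  simp only [dbox, dbox_alt, show List.range 4 = [0, 1, 2, 3] from rfl]
  simp [PySem.List.pyGetD, PySem.List.pyIdx?,
        pv_bxor_assoc, pv_bxor_left_comm, pv_bxor_cancel,
        PySem.Int.bxor_comm, PySem.Int.bxor_self, PySem.Int.bxor_zero, pv_zero_bxor]
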